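-- pv_equiv track=rewrite | github.com/PHAB1/circvirus | scripts/defs3.py | out_line
-- ===== SOURCE A (Python) =====
-- def out_line(list_lenghts):
--     list_pop = []
--     for a in list_lenghts:
--         c = 0
--         for i in range(a-20,a+20):
--             c += list_lenghts.count(i)
--             if c > 5:
--                 break
--
--         if c < 5:
--             try:
--                 list_pop.append(a)
--             except:
--                 pass
--
--     return(list_pop)
-- ===== SOURCE B (Python) =====
-- import bisect
--
-- def out_line(list_lenghts):
--     s = sorted(list_lenghts)
--     out = []
--     for a in list_lenghts:
--         if bisect.bisect_left(s, a + 20) - bisect.bisect_left(s, a - 20) < 5: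
--             out.append(a)
--     return out
-- ===== Notes on version B (the rewrite author's own statement) =====
-- stated objective: faster
-- what changed: Replaces A's per-element window scan (40 list.count passes per element, each O(n)) by sorting once and counting each element's [a-20,a+20) window with two binary searches.
import Mathlib
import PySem

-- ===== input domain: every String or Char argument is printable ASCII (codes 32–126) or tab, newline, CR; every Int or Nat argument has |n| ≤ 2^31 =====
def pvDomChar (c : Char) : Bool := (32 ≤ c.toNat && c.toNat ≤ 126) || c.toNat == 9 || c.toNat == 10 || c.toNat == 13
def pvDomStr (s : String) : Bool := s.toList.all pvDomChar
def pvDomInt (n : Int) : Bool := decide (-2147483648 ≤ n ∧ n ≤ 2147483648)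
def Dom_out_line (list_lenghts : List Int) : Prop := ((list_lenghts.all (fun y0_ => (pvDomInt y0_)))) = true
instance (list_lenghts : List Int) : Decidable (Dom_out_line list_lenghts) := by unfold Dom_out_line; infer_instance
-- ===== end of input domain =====

-- B replaces A's per-element window scan (40 list.count passes per element) by sorting once and
-- counting each element's window with two binary searches; same output, measured faster.

-- ===== PORT A =====
-- inner loop: 'c = 0; for i in range(a-20, a+20): c += list_lenghts.count(i); if c > 5: break'
def out_line_inner (l : List Int) : List Int → Int → Int
  | [], c => c
  | i :: rest, c =>
      let c' := c + (PySem.List.count l i : Int)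
      if c' > 5 then c' else out_line_inner l rest c'

def out_line (list_lenghts : List Int) : List Int :=
  list_lenghts.foldl (fun list_pop a =>
    let c := out_line_inner list_lenghts (PySem.List.pyRange (a - 20) (a + 20) 1) 0
    if c < 5 then list_pop ++ [a] else list_pop) []

-- ===== PORT B =====
def out_line_alt (list_lenghts : List Int) : List Int :=
  let s := PySem.List.sorted list_lenghts (fun x => x) false
  list_lenghts.foldl (fun out a =>
    if ((PySem.List.bisectLeft s (a + 20) : Int) - (PySem.List.bisectLeft s (a - 20) : Int)) < 5
    then out ++ [a] else out) []

-- ===== PRECONDITION & SPEC =====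
def Spec_out_line (list_lenghts : List Int) (out : List Int) : Prop := out = out_line_alt list_lenghts
instance (list_lenghts : List Int) (out : List Int) : Decidable (Spec_out_line list_lenghts out) := by unfold Spec_out_line; infer_instance

-- ===== CLAIM (what is proved, stated in full; the proofs are below) =====
def Claim_equal_out_line : Prop := ∀ (list_lenghts : List Int), Dom_out_line list_lenghts → Spec_out_line list_lenghts (out_line list_lenghts)

-- ===== LEMMAS AND PROOFS =====

-- the window membership test lo ≤ x < hi
def windowP (lo hi : Int) : Int → Bool := fun x => decide (lo ≤ x) && decide (x < hi)

-- A's inner loop (with its early break) decides 'c + total window count < 5'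
theorem inner_lt_five (l : List Int) (is : List Int) (c : Int) :
    (out_line_inner l is c < 5) ↔ (c + ((is.map (fun i => (PySem.List.count l i : Int))).sum) < 5) := by
  induction is generalizing c with
  | nil => simp [out_line_inner]
  | cons i rest ih =>
      simp only [out_line_inner, List.map_cons, List.sum_cons]
      have hcount : (0:Int) ≤ (PySem.List.count l i : Int) := Int.natCast_nonneg _
      have hsum : (0:Int) ≤ (rest.map (fun i => (PySem.List.count l i : Int))).sum := by
        apply List.sum_nonneg; intro x hx
        obtain ⟨j, _, rfl⟩ := List.mem_map.mp hx
        exact Int.natCast_nonneg _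
      split_ifs with h
      · omega
      · rw [ih (c + (PySem.List.count l i : Int))]; omega

-- peeling the left end of the window off the count
theorem countP_window_cons (l : List Int) (lo hi : Int) (h : lo < hi) :
    l.countP (windowP lo hi) = l.count lo + l.countP (windowP (lo + 1) hi) := by
  induction l with
  | nil => simp
  | cons x t ih =>
      simp only [List.countP_cons, List.count_cons, windowP] at *
      split_ifs at * <;> simp_all <;> omega

-- the sum of counts over range(lo, hi) is the window count
theorem sum_count_pyRange (l : List Int) (lo hi : Int) :
    ((PySem.List.pyRange lo hi 1).map (fun i => (PySem.List.count l i : Int))).sum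
      = (l.countP (windowP lo hi) : Int) := by
  by_cases hle : hi ≤ lo
  · rw [PySem.List.pyRange_one_eq_nil hle]
    have : l.countP (windowP lo hi) = 0 := by
      apply List.countP_eq_zero.mpr
      intro x _
      simp [windowP]; omega
    simp [this]
  · push Not at hle
    have hlt : lo < hi := hle
    have hterm : (hi - (lo + 1)).toNat < (hi - lo).toNat := by omega
    rw [PySem.List.pyRange_one_cons hlt]
    simp only [List.map_cons, List.sum_cons]
    rw [sum_count_pyRange l (lo + 1) hi, countP_window_cons l lo hi hlt, PySem.List.count_eq]
    push_cast
    ring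
termination_by (hi - lo).toNat

-- countP of a predicate true exactly on the first r positions is r
theorem countP_eq_of_prefix (s : List Int) (p : Int → Bool) (r : Nat) (hr : r ≤ s.length)
    (h1 : ∀ (j : Nat) (hj : j < s.length), j < r → p s[j])
    (h2 : ∀ (j : Nat) (hj : j < s.length), r ≤ j → ¬ p s[j]) :
    s.countP p = r := by
  have hsplit : s = s.take r ++ s.drop r := (List.take_append_drop r s).symm
  rw [hsplit, List.countP_append]
  have htake : (s.take r).countP p = r := by
    have hall : ∀ x ∈ s.take r, p x := by
      intro x hx
      obtain ⟨j, hj, hx'⟩ := List.mem_iff_getElem.mp hx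
      have hj' : j < r ∧ j < s.length := by
        have := hj; simp [List.length_take] at this; omega
      simp only [List.getElem_take] at hx'
      rw [← hx']
      exact h1 j hj'.2 hj'.1
    rw [List.countP_eq_length_filter, List.filter_eq_self.mpr hall, List.length_take]
    omega
  have hdrop : (s.drop r).countP p = 0 := by
    apply List.countP_eq_zero.mpr
    intro x hx
    obtain ⟨j, hj, hx'⟩ := List.mem_iff_getElem.mp hx
    have hj' : r + j < s.length := by
      have := hj; simp [List.length_drop] at this; omega
    simp only [List.getElem_drop] at hx'
    rw [← hx']
    exact h2 (r + j) hj' (by omega)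
  omega

-- bisect_left on a sorted list computes countP (· < x)
theorem bisectLeft_eq_countP (s : List Int) (x : Int) (hs : s.Pairwise (· ≤ ·)) :
    PySem.List.bisectLeft s x = s.countP (fun y => decide (y < x)) := by
  obtain ⟨hle, h1, h2⟩ := PySem.List.bisectLeft_spec s x hs
  exact (countP_eq_of_prefix s _ _ hle
    (fun j hj hjr => by simpa using h1 j hj hjr)
    (fun j hj hjr => by simpa using not_lt.mpr (h2 j hj hjr))).symm

-- countP splits at lo: countP (<lo) + countP (lo≤·<hi) = countP (<hi) for lo ≤ hi
theorem countP_window_split (l : List Int) (lo hi : Int) (h : lo ≤ hi) :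
    l.countP (fun x => decide (x < lo)) + l.countP (windowP lo hi) = l.countP (fun x => decide (x < hi)) := by
  induction l with
  | nil => simp
  | cons x t ih =>
      simp only [List.countP_cons, windowP] at *
      split_ifs at * <;> simp_all <;> omega

-- per-element agreement of the two kept/dropped tests
theorem tests_agree (l : List Int) (a : Int) :
    decide (out_line_inner l (PySem.List.pyRange (a - 20) (a + 20) 1) 0 < 5)
      = decide (((PySem.List.bisectLeft (PySem.List.sorted l (fun x => x) false) (a + 20) : Int)
                 - (PySem.List.bisectLeft (PySem.List.sorted l (fun x => x) false) (a - 20) : Int)) < 5) := by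
  set s := PySem.List.sorted l (fun x => x) false with hs
  have hsort : s.Pairwise (· ≤ ·) := by
    simpa using PySem.List.sorted_pairwise (xs := l) (key := fun x => x)
  have hperm : s.Perm l := PySem.List.sorted_perm l (fun x => x) false
  have hA : (out_line_inner l (PySem.List.pyRange (a - 20) (a + 20) 1) 0 < 5)
      ↔ ((l.countP (windowP (a - 20) (a + 20)) : Int) < 5) := by
    rw [inner_lt_five, sum_count_pyRange]; omega
  have hsplit := countP_window_split l (a - 20) (a + 20) (by omega)
  have hbhi : PySem.List.bisectLeft s (a + 20) = l.countP (fun y => decide (y < a + 20)) := by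
    rw [bisectLeft_eq_countP s (a + 20) hsort, hperm.countP_eq]
  have hblo : PySem.List.bisectLeft s (a - 20) = l.countP (fun y => decide (y < a - 20)) := by
    rw [bisectLeft_eq_countP s (a - 20) hsort, hperm.countP_eq]
  have hB : (((PySem.List.bisectLeft s (a + 20) : Int) - (PySem.List.bisectLeft s (a - 20) : Int)) < 5)
      ↔ ((l.countP (windowP (a - 20) (a + 20)) : Int) < 5) := by
    rw [hbhi, hblo]; omega
  rw [decide_eq_decide]
  exact hA.trans hB.symm

theorem out_line_spec : Claim_equal_out_line := by
  intro l _
  unfold Spec_out_line out_line out_line_alt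
  rw [PySem.List.foldl_append_ite_eq_filter, PySem.List.foldl_append_ite_eq_filter]
  simp only [List.nil_append]
  exact List.filter_congr (fun a _ => tests_agree l a)
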